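-- pv_equiv track=rewrite | github.com/KibyPoyo/AdventOfCode2024 | jour18/jour18.py | fichier_to_tab
-- ===== SOURCE A (Python) =====
-- def fichier_to_tab(fichier, dimensions, corruptedBytes):
--     tab = [['.'] * dimensions[1] for _ in range(dimensions[0])]
--
--     for line in fichier:
--         line = line.strip()
--         line = line.split(',')
--         j,i = map(int, line)  # axes x y retournés dans un tableau
--         if 0 <= i < dimensions[0] and 0 <= j < dimensions[1]:
--             tab[i][j] = '#'
--
--         corruptedBytes -= 1
--         if corruptedBytes <= 0:
--             break
--
--     return tab
-- ===== SOURCE B (Python) =====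
-- def fichier_to_tab(fichier, dimensions, corruptedBytes):
--     corrupted = set()
--     for line, _ in zip(fichier, range(corruptedBytes)):
--         j, i = map(int, line.strip().split(','))
--         if 0 <= i < dimensions[0] and 0 <= j < dimensions[1]:
--             corrupted.add((i, j))
--     return [['#' if (i, j) in corrupted else '.' for j in range(dimensions[1])]
--             for i in range(dimensions[0])]
-- ===== Notes on version B (the rewrite author's own statement) =====
-- stated objective: alternative
-- what changed: B pairs the lines with range(corruptedBytes) to take the first corruptedBytes lines, collects the in-bounds coordinates into a set, and builds the whole grid afterwards by a membership test over every cell, instead of A's pre-allocated grid mutated in place inside a counting loop with a break.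
-- intended difference: On inputs with corruptedBytes <= 0 whose first line parses to an in-bounds coordinate, A still marks that one cell (it decrements the counter before testing it, so it always consumes one line), while B marks nothing and returns the all-'.' grid, which is the intended meaning of taking the first corruptedBytes bytes. — e.g. on fichier_to_tab(["1,1"], (2, 2), 0): A returns [[".", "."], [".", "#"]], B returns [[".", "."], [".", "."]]
import Mathlib
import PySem

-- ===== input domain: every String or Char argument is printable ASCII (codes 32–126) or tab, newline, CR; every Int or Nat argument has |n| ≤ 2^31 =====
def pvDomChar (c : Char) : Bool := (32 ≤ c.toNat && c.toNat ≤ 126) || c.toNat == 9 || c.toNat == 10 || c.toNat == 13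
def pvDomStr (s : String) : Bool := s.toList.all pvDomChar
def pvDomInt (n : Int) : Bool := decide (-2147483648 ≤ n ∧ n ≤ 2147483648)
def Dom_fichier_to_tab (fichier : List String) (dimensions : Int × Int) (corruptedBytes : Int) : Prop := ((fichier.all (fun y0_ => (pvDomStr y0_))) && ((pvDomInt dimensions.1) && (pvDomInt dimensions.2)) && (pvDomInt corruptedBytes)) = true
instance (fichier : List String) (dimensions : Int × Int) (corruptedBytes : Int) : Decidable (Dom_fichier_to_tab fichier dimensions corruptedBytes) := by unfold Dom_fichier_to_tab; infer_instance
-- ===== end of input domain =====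

-- B builds the grid by a set of corrupted coordinates (first corruptedBytes lines) and a
-- full-grid membership scan, instead of A's in-place cell mutation inside a counting loop
-- (objective: alternative decomposition).

-- shared parsing helper: `j, i = map(int, line.strip().split(','))` — some (j, i) iff the
-- Python statement succeeds (exactly two comma-separated int()-parseable parts)
def pvParse (line : String) : Option (Int × Int) :=
  match PySem.Str.split? (PySem.Str.strip line) "," with
  | some [a, b] =>
    match PySem.Int.ofStr? a, PySem.Int.ofStr? b with
    | some j, some i => some (j, i)
    | _, _ => none
  | _ => none

-- ===== PORT A =====
-- the `for line in fichier` loop of A, carrying the mutated grid and the counter;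
-- on a parse failure Python raises ValueError (excluded by Pre_): the port returns the grid so far
def fichier_to_tab_loop (dimensions : Int × Int) : List String → List (List String) → Int → List (List String)
  | [], tab, _ => tab
  | line :: rest, tab, cb =>
    match pvParse line with
    | none => tab
    | some (j, i) =>
      let tab' :=
        if 0 ≤ i ∧ i < dimensions.1 ∧ 0 ≤ j ∧ j < dimensions.2 then
          PySem.List.pySetD tab i (PySem.List.pySetD (PySem.List.pyGetD tab i []) j "#")
        else tab
      if cb - 1 ≤ 0 then tab' else fichier_to_tab_loop dimensions rest tab' (cb - 1)

def fichier_to_tab (fichier : List String) (dimensions : Int × Int) (corruptedBytes : Int) : List (List String) :=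
  let tab := (PySem.List.pyRange 0 dimensions.1 1).map (fun _ => PySem.List.pyRepeat ["."] dimensions.2)
  fichier_to_tab_loop dimensions fichier tab corruptedBytes

-- ===== PORT B =====
-- body of B's collecting loop: parse the line, add the in-bounds coordinate to the set
def pvMarkStep (dimensions : Int × Int) (s : PySem.Set (Int × Int)) (line : String) : PySem.Set (Int × Int) :=
  match pvParse line with
  | none => s
  | some (j, i) =>
    if 0 ≤ i ∧ i < dimensions.1 ∧ 0 ≤ j ∧ j < dimensions.2 then PySem.Set.add s (i, j) else s

def fichier_to_tab_alt (fichier : List String) (dimensions : Int × Int) (corruptedBytes : Int) : List (List String) :=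
  let corrupted := (fichier.zip (PySem.List.pyRange 0 corruptedBytes 1)).foldl
      (fun s p => pvMarkStep dimensions s p.1) PySem.Set.empty
  (PySem.List.pyRange 0 dimensions.1 1).map (fun i =>
    (PySem.List.pyRange 0 dimensions.2 1).map (fun j =>
      if PySem.Set.contains corrupted (i, j) then "#" else "."))

-- ===== PRECONDITION & SPEC =====
-- Pre_ excludes exactly the inputs on which A raises ValueError: a line among the
-- ones A processes (the first max(corruptedBytes,1)) that is not two comma-separated ints.
def Pre_fichier_to_tab (fichier : List String) (dimensions : Int × Int) (corruptedBytes : Int) : Prop :=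
  ∀ l ∈ fichier.take (max corruptedBytes 1).toNat, (pvParse l).isSome = true
instance (fichier : List String) (dimensions : Int × Int) (corruptedBytes : Int) : Decidable (Pre_fichier_to_tab fichier dimensions corruptedBytes) := by unfold Pre_fichier_to_tab; infer_instance

def pvWitness_fichier_to_tab : List String × (Int × Int) × Int := (["1,2", "0,0"], (3, 3), 2)

-- On inputs with corruptedBytes ≤ 0 whose first line parses to an in-bounds coordinate,
-- A still marks that one cell (it decrements the counter before testing it, so it always
-- consumes one line), while B marks nothing and returns the all-'.' grid, which is the
-- intended meaning of taking the first corruptedBytes bytes.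
def D_fichier_to_tab (fichier : List String) (dimensions : Int × Int) (corruptedBytes : Int) : Prop :=
  corruptedBytes ≤ 0 ∧
    ((fichier.head?.bind pvParse).any fun p =>
      decide (0 ≤ p.2 ∧ p.2 < dimensions.1 ∧ 0 ≤ p.1 ∧ p.1 < dimensions.2)) = true
instance (fichier : List String) (dimensions : Int × Int) (corruptedBytes : Int) : Decidable (D_fichier_to_tab fichier dimensions corruptedBytes) := by unfold D_fichier_to_tab; infer_instance

def Spec_fichier_to_tab (fichier : List String) (dimensions : Int × Int) (corruptedBytes : Int) (out : List (List String)) : Prop := ¬ D_fichier_to_tab fichier dimensions corruptedBytes → out = fichier_to_tab_alt fichier dimensions corruptedBytes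
instance (fichier : List String) (dimensions : Int × Int) (corruptedBytes : Int) (out : List (List String)) : Decidable (Spec_fichier_to_tab fichier dimensions corruptedBytes out) := by unfold Spec_fichier_to_tab; infer_instance

def pvDiffWitness_fichier_to_tab : List String × (Int × Int) × Int := (["1,1"], (2, 2), 0)
def pvDiffWitnessOut_fichier_to_tab : (List (List String)) × (List (List String)) :=
  ([[".", "."], [".", "#"]], [[".", "."], [".", "."]])

-- ===== CLAIM (what is proved, stated in full; the proofs are below) =====
def Claim_unchanged_fichier_to_tab : Prop := ∀ (fichier : List String) (dimensions : Int × Int) (corruptedBytes : Int), Dom_fichier_to_tab fichier dimensions corruptedBytes → Pre_fichier_to_tab fichier dimensions corruptedBytes → Spec_fichier_to_tab fichier dimensions corruptedBytes (fichier_to_tab fichier dimensions corruptedBytes)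
def Claim_changed_fichier_to_tab : Prop := Dom_fichier_to_tab (pvDiffWitness_fichier_to_tab.1) (pvDiffWitness_fichier_to_tab.2.1) (pvDiffWitness_fichier_to_tab.2.2) ∧ Pre_fichier_to_tab (pvDiffWitness_fichier_to_tab.1) (pvDiffWitness_fichier_to_tab.2.1) (pvDiffWitness_fichier_to_tab.2.2) ∧ D_fichier_to_tab (pvDiffWitness_fichier_to_tab.1) (pvDiffWitness_fichier_to_tab.2.1) (pvDiffWitness_fichier_to_tab.2.2) ∧ fichier_to_tab (pvDiffWitness_fichier_to_tab.1) (pvDiffWitness_fichier_to_tab.2.1) (pvDiffWitness_fichier_to_tab.2.2) = pvDiffWitnessOut_fichier_to_tab.1 ∧ fichier_to_tab_alt (pvDiffWitness_fichier_to_tab.1) (pvDiffWitness_fichier_to_tab.2.1) (pvDiffWitness_fichier_to_tab.2.2) = pvDiffWitnessOut_fichier_to_tab.2 ∧ pvDiffWitnessOut_fichier_to_tab.1 ≠ pvDiffWitnessOut_fichier_to_tab.2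
def Claim_exact_fichier_to_tab : Prop := ∀ (fichier : List String) (dimensions : Int × Int) (corruptedBytes : Int), Dom_fichier_to_tab fichier dimensions corruptedBytes → Pre_fichier_to_tab fichier dimensions corruptedBytes → D_fichier_to_tab fichier dimensions corruptedBytes → fichier_to_tab fichier dimensions corruptedBytes ≠ fichier_to_tab_alt fichier dimensions corruptedBytes

-- ===== LEMMAS AND PROOFS =====

-- the grid determined by a set of corrupted coordinates
def pvGrid (dimensions : Int × Int) (s : PySem.Set (Int × Int)) : List (List String) :=
  (PySem.List.pyRange 0 dimensions.1 1).map (fun i =>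
    (PySem.List.pyRange 0 dimensions.2 1).map (fun j =>
      if PySem.Set.contains s (i, j) then "#" else "."))

lemma pvGrid_empty (d : Int × Int) :
    (PySem.List.pyRange 0 d.1 1).map (fun _ => PySem.List.pyRepeat ["."] d.2) = pvGrid d PySem.Set.empty := by
  unfold pvGrid
  refine List.map_congr_left (fun i _ => ?_)
  rw [PySem.List.pyRepeat_singleton]
  refine (List.eq_replicate_iff.mpr ⟨?_, ?_⟩).symm
  · simp [PySem.List.length_pyRange_one]
  · intro b hb
    simp only [List.mem_map] at hb
    obtain ⟨j, _, hj⟩ := hb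
    simpa [PySem.Set.contains, PySem.Set.empty] using hj.symm

lemma pv_contains_add (s : PySem.Set (Int × Int)) (x y : Int × Int) :
    PySem.Set.contains (PySem.Set.add s x) y = (PySem.Set.contains s y || y == x) := by
  apply Bool.eq_iff_iff.mpr
  simp [PySem.Set.mem_add]

lemma pvGrid_mark (d : Int × Int) (s : PySem.Set (Int × Int)) (i j : Int)
    (hi0 : 0 ≤ i) (hi : i < d.1) (hj0 : 0 ≤ j) (hj : j < d.2) :
    PySem.List.pySetD (pvGrid d s) i (PySem.List.pySetD (PySem.List.pyGetD (pvGrid d s) i []) j "#")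
      = pvGrid d (PySem.Set.add s (i, j)) := by
  unfold pvGrid
  rw [PySem.List.pyGetD_map_pyRange_of_nonneg _ d.1 i _ hi0 hi]
  rw [PySem.List.pySetD_of_nonneg _ _ hi0, PySem.List.pySetD_of_nonneg _ _ hj0]
  apply List.ext_getElem
  · simp
  · intro k hk hk'
    simp only [List.length_set, List.length_map, PySem.List.length_pyRange_one] at hk hk'
    simp only [List.getElem_set, List.getElem_map, PySem.List.getElem_pyRange_one, zero_add]
    by_cases hki : i.toNat = k
    · rw [if_pos hki]
      have hkc : ((k : Nat) : Int) = i := by omega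
      apply List.ext_getElem
      · simp
      · intro m hm hm'
        simp only [List.length_set, List.length_map, PySem.List.length_pyRange_one] at hm hm'
        simp only [List.getElem_set, List.getElem_map, PySem.List.getElem_pyRange_one, zero_add]
        rw [pv_contains_add, hkc]
        by_cases hmj : j.toNat = m
        · have hmc : ((m : Nat) : Int) = j := by omega
          rw [if_pos hmj, hmc]
          simp
        · have hmc : ((m : Nat) : Int) ≠ j := by omega
          rw [if_neg hmj]
          have hb : (((i, ((m : Nat) : Int))) == (i, j)) = false :=
            beq_eq_false_iff_ne.mpr (by simp [Prod.ext_iff]; intro h; exact absurd h hmc)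
          rw [hb, Bool.or_false]
    · rw [if_neg hki]
      have hkc : ((k : Nat) : Int) ≠ i := by omega
      refine List.map_congr_left (fun m _ => ?_)
      rw [pv_contains_add]
      have hb : ((((k : Nat) : Int), m) == (i, j)) = false :=
        beq_eq_false_iff_ne.mpr (by simp [Prod.ext_iff]; intro h; exact absurd h hkc)
      rw [hb, Bool.or_false]

lemma pvLoop_eq (d : Int × Int) (lines : List String) :
    ∀ (cb : Int) (s : PySem.Set (Int × Int)),
      (∀ l ∈ lines.take (max cb 1).toNat, (pvParse l).isSome = true) →
      fichier_to_tab_loop d lines (pvGrid d s) cb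
        = pvGrid d ((lines.take (max cb 1).toNat).foldl (pvMarkStep d) s) := by
  induction lines with
  | nil => intro cb s _; simp [fichier_to_tab_loop]
  | cons line rest ih =>
    intro cb s h
    have hk : (max cb 1).toNat = ((max cb 1).toNat - 1) + 1 := by omega
    have htake : (line :: rest).take (max cb 1).toNat
        = line :: rest.take ((max cb 1).toNat - 1) := by
      rw [hk]; rfl
    have hline : (pvParse line).isSome = true := by
      apply h; rw [htake]; exact List.mem_cons_self
    obtain ⟨⟨j, i⟩, hji⟩ := Option.isSome_iff_exists.mp hline
    simp only [fichier_to_tab_loop, hji]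
    have hstep : (if 0 ≤ i ∧ i < d.1 ∧ 0 ≤ j ∧ j < d.2 then
          PySem.List.pySetD (pvGrid d s) i
            (PySem.List.pySetD (PySem.List.pyGetD (pvGrid d s) i []) j "#")
        else pvGrid d s) = pvGrid d (pvMarkStep d s line) := by
      simp only [pvMarkStep, hji]
      split_ifs with hc
      · exact pvGrid_mark d s i j hc.1 hc.2.1 hc.2.2.1 hc.2.2.2
      · rfl
    rw [hstep]
    by_cases hcb : cb - 1 ≤ 0
    · have h1 : (max cb 1).toNat = 1 := by omega
      rw [if_pos hcb, htake, h1]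
      simp [List.foldl]
    · have h2 : (max (cb - 1) 1).toNat = (max cb 1).toNat - 1 := by omega
      rw [if_neg hcb, htake]
      simp only [List.foldl_cons]
      rw [ih (cb - 1) (pvMarkStep d s line) ?_]
      · rw [h2]
      · intro l hl
        apply h
        rw [htake, h2] at *
        exact List.mem_cons_of_mem _ hl

-- B's zip-with-range loop folds exactly the first ys.length lines
lemma pvZip_foldl (d : Int × Int) (xs : List String) :
    ∀ (ys : List Int) (s : PySem.Set (Int × Int)),
      (xs.zip ys).foldl (fun s p => pvMarkStep d s p.1) s
        = (xs.take ys.length).foldl (pvMarkStep d) s := by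
  induction xs with
  | nil => intro ys s; simp
  | cons x xs ih =>
    intro ys s
    cases ys with
    | nil => simp
    | cons y ys => simp [List.zip_cons_cons, ih ys]

-- B's result is the grid of the fold over the first corruptedBytes.toNat lines
lemma pvAlt_eq (fichier : List String) (d : Int × Int) (cb : Int) :
    fichier_to_tab_alt fichier d cb
      = pvGrid d ((fichier.take cb.toNat).foldl (pvMarkStep d) PySem.Set.empty) := by
  unfold fichier_to_tab_alt pvGrid
  rw [pvZip_foldl, PySem.List.length_pyRange_one]
  simp

-- ===== VERDICT (by name: the statement is the Claim_ definition above) =====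
theorem fichier_to_tab_spec : Claim_unchanged_fichier_to_tab := by
  intro fichier d cb _ hpre
  unfold Spec_fichier_to_tab
  intro hnD
  rw [pvAlt_eq]
  show fichier_to_tab_loop d fichier
      ((PySem.List.pyRange 0 d.1 1).map (fun _ => PySem.List.pyRepeat ["."] d.2)) cb
    = pvGrid d ((fichier.take cb.toNat).foldl (pvMarkStep d) PySem.Set.empty)
  rw [pvGrid_empty d, pvLoop_eq d fichier cb PySem.Set.empty hpre]
  by_cases hcb : 1 ≤ cb
  · have : (max cb 1).toNat = cb.toNat := by omega
    rw [this]
  · -- cb ≤ 0: A consumes one line, B none; ¬D_ says that line marks nothing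
    have h0 : cb.toNat = 0 := by omega
    have h1 : (max cb 1).toNat = 1 := by omega
    rw [h0, h1]
    cases fichier with
    | nil => simp
    | cons line rest =>
      have hline : (pvParse line).isSome = true := by
        apply hpre; rw [h1]; exact List.mem_cons_self
      obtain ⟨⟨j, i⟩, hji⟩ := Option.isSome_iff_exists.mp hline
      have hout : ¬ (0 ≤ i ∧ i < d.1 ∧ 0 ≤ j ∧ j < d.2) := by
        intro hc
        exact hnD ⟨by omega, by simp [List.head?, hji, Option.any]; exact hc⟩
      simp only [List.take_succ_cons, List.take_zero, List.foldl_cons, List.foldl_nil]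
      simp [pvMarkStep, hji, hout]

theorem fichier_to_tab_changed : Claim_changed_fichier_to_tab := by
  unfold Claim_changed_fichier_to_tab; decide

theorem fichier_to_tab_tight : Claim_exact_fichier_to_tab := by
  intro fichier d cb _ hpre hD
  obtain ⟨hcb, hmark⟩ := hD
  cases fichier with
  | nil => simp [List.head?] at hmark
  | cons line rest =>
    simp only [List.head?, Option.bind] at hmark
    cases hji : pvParse line with
    | none => rw [hji] at hmark; simp [Option.any] at hmark
    | some p =>
      obtain ⟨j, i⟩ := p
      rw [hji] at hmark
      simp only [Option.any, decide_eq_true_eq] at hmark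
      obtain ⟨hi0, hi, hj0, hj⟩ := hmark
      have h0 : cb.toNat = 0 := by omega
      have h1 : (max cb 1).toNat = 1 := by omega
      have hA : fichier_to_tab (line :: rest) d cb
          = pvGrid d (PySem.Set.add PySem.Set.empty (i, j)) := by
        show fichier_to_tab_loop d (line :: rest)
            ((PySem.List.pyRange 0 d.1 1).map (fun _ => PySem.List.pyRepeat ["."] d.2)) cb
          = _
        rw [pvGrid_empty d, pvLoop_eq d _ cb PySem.Set.empty hpre, h1]
        simp [pvMarkStep, hji, hi0, hi, hj0, hj]
      have hB : fichier_to_tab_alt (line :: rest) d cb = pvGrid d PySem.Set.empty := by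
        rw [pvAlt_eq, h0]; simp
      rw [hA, hB]
      intro heq
      have hki : i.toNat < (pvGrid d (PySem.Set.add PySem.Set.empty (i, j))).length := by
        simp [pvGrid, PySem.List.length_pyRange_one]; omega
      have hki' : i.toNat < (pvGrid d PySem.Set.empty).length := by
        simp [pvGrid, PySem.List.length_pyRange_one]; omega
      have hrow := List.getElem_of_eq heq hki
      have hkj : j.toNat < ((pvGrid d (PySem.Set.add PySem.Set.empty (i, j)))[i.toNat]).length := by
        simp [pvGrid, PySem.List.length_pyRange_one]; omega
      have hcell := List.getElem_of_eq hrow hkj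
      have hic : (0 : Int) + (i.toNat : Int) = i := by omega
      have hjc : (0 : Int) + (j.toNat : Int) = j := by omega
      simp only [pvGrid, List.getElem_map, PySem.List.getElem_pyRange_one, hic, hjc] at hcell
      rw [pv_contains_add] at hcell
      simp [PySem.Set.contains, PySem.Set.empty] at hcell
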